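-- pv_equiv track=rewrite | github.com/xiyiwang/leetcode-challenge-solutions | 2021-01/2021-01-22-closeStrings.py | closeStrings
-- ===== SOURCE A (Python) =====
-- def closeStrings(word1: str, word2: str) -> bool:
--     if len(word1) == len(word2) and len(set(word1)) == len(set(word2)):
--         if set(word1) == set(word2):
--             char_count_1 = []
--             char_count_2 = []
--             for char in set(word1):
--                 char_count_1.append(word1.count(char))
--                 char_count_2.append(word2.count(char))
--             if sorted(char_count_1) != sorted(char_count_2):
--                 return False
--             return True
--     return False
-- ===== SOURCE B (Python) =====
-- def closeStrings(word1: str, word2: str) -> bool: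
--     k1, l1 = _runs(sorted(word1))
--     k2, l2 = _runs(sorted(word2))
--     return k1 == k2 and sorted(l1) == sorted(l2)
--
-- def _runs(s):
--     # s is a sorted list of characters; returns (run keys, run lengths):
--     # the distinct characters in increasing order and the length of each run.
--     if not s:
--         return [], []
--     c = s[0]
--     i = 1
--     while i < len(s) and s[i] == c:
--         i += 1
--     keys, lens = _runs(s[i:])
--     return [c] + keys, [i] + lens
-- ===== Notes on version B (the rewrite author's own statement) =====
-- stated objective: alternative
-- what changed: Replaces A's set comparisons plus repeated word.count scans per distinct character with a sort-then-scan: each word is sorted and split recursively into runs, and the two run-key lists and sorted run-length lists are compared (A's explicit length and set-size guards are implied and dropped).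
import Mathlib
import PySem

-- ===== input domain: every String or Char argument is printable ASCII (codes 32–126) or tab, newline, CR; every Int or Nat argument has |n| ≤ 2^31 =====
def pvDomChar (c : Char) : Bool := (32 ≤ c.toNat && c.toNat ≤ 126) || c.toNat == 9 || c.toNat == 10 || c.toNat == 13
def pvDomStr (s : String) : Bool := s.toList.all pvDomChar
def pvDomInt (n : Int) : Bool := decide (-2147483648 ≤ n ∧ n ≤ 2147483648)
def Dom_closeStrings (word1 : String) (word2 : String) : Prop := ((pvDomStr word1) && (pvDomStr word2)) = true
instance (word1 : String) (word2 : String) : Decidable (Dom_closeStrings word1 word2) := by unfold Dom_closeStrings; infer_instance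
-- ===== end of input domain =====

-- B replaces A's set comparisons plus repeated word.count scans with a sort-then-scan:
-- each word is sorted and split recursively into runs; the run-key lists and the sorted
-- run-length lists are compared (A's length/set-size guards are implied and dropped).

-- ===== PORT A =====
def closeStrings (word1 : String) (word2 : String) : Bool :=
  if PySem.Str.len word1 == PySem.Str.len word2
      && PySem.Set.len (PySem.Set.ofList word1.toList) == PySem.Set.len (PySem.Set.ofList word2.toList) then
    if PySem.Set.equal (PySem.Set.ofList word1.toList) (PySem.Set.ofList word2.toList) then
      -- for char in set(word1): char_count_1.append(word1.count(char)); char_count_2.append(word2.count(char))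
      let cc := (PySem.Set.ofList word1.toList).foldl
        (fun (p : List Int × List Int) ch =>
          (p.1 ++ [(PySem.Str.count word1 (String.ofList [ch]) : Int)],
           p.2 ++ [(PySem.Str.count word2 (String.ofList [ch]) : Int)])) ([], [])
      if PySem.List.sorted cc.1 (fun x => x) != PySem.List.sorted cc.2 (fun x => x) then
        false
      else
        true
    else false
  else false

-- ===== PORT B =====
-- _runs(s): recursion on the sorted character list; the inner while-loop that skips the
-- run of the head character is the takeWhile/dropWhile split (exact: s[1:i] is the run,
-- s[i:] is the remainder), i = run.length + 1.
def pvRuns : List Char → List Char × List Int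
  | [] => ([], [])
  | c :: rest =>
      let run := rest.takeWhile (fun x => x == c)
      let p := pvRuns (rest.dropWhile (fun x => x == c))
      (c :: p.1, ((run.length + 1 : Nat) : Int) :: p.2)
termination_by s => s.length
decreasing_by
  simp only [List.length_cons]
  exact Nat.lt_succ_of_le (List.length_dropWhile_le _ _)


def closeStrings_alt (word1 : String) (word2 : String) : Bool :=
  let p1 := pvRuns (PySem.List.sorted word1.toList (fun x => x))
  let p2 := pvRuns (PySem.List.sorted word2.toList (fun x => x))
  p1.1 == p2.1 && (PySem.List.sorted p1.2 (fun x => x) == PySem.List.sorted p2.2 (fun x => x))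

-- ===== PRECONDITION & SPEC =====
def Spec_closeStrings (word1 : String) (word2 : String) (out : Bool) : Prop := out = closeStrings_alt word1 word2
instance (word1 : String) (word2 : String) (out : Bool) : Decidable (Spec_closeStrings word1 word2 out) := by unfold Spec_closeStrings; infer_instance

-- ===== CLAIM (what is proved, stated in full; the proofs are below) =====
def Claim_equal_closeStrings : Prop := ∀ (word1 : String) (word2 : String), Dom_closeStrings word1 word2 → Spec_closeStrings word1 word2 (closeStrings word1 word2)

-- ===== LEMMAS AND PROOFS =====

theorem pvRuns_mem (s : List Char) : ∀ c, c ∈ (pvRuns s).1 ↔ c ∈ s := by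
  induction s using pvRuns.induct with
  | case1 => simp [pvRuns]
  | case2 c rest ih =>
    intro x
    rw [pvRuns]
    simp only [List.mem_cons]
    constructor
    · rintro (rfl | hx)
      · exact .inl rfl
      · have := (ih x).mp hx
        right
        exact List.dropWhile_sublist _ |>.mem this
    · rintro (rfl | hx)
      · exact .inl rfl
      · by_cases hxc : x = c
        · exact .inl hxc
        · right
          rw [ih x]
          have hsplit := List.takeWhile_append_dropWhile (p := fun y => y == c) (l := rest)
          rw [← hsplit] at hx
          rcases List.mem_append.mp hx with h | h
          · exact absurd (by simpa using List.mem_takeWhile_imp h) hxc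
          · exact h

theorem not_mem_dropWhile_of_sorted (c : Char) (rest : List Char)
    (hs : rest.Pairwise (· ≤ ·)) (hge : ∀ x ∈ rest, c ≤ x) :
    c ∉ rest.dropWhile (fun x => x == c) := by
  intro hmem
  have hsub := List.dropWhile_sublist (p := fun y => y == c) (l := rest)
  cases htl : rest.dropWhile (fun x => x == c) with
  | nil => simp [htl] at hmem
  | cons h t =>
    have hh : (h == c) = false := by
      have := List.head?_dropWhile_not (p := fun y => y == c) (l := rest)
      rw [htl] at this; simpa using this
    have hhne : h ≠ c := by simpa using hh
    have hpt : (h :: t).Pairwise (· ≤ ·) := htl ▸ hs.sublist hsub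
    rw [htl] at hmem
    rcases List.mem_cons.mp hmem with rfl | hct
    · exact hhne rfl
    · have h1 : h ≤ c := (List.pairwise_cons.mp hpt).1 c hct
      have h2 : c ≤ h := hge h (hsub.mem (htl ▸ List.mem_cons_self))
      exact hhne (le_antisymm h1 h2)

theorem pvRuns_keys_lt (s : List Char) (hs : s.Pairwise (· ≤ ·)) :
    (pvRuns s).1.Pairwise (· < ·) := by
  induction s using pvRuns.induct with
  | case1 => simp [pvRuns]
  | case2 c rest ih =>
    rw [pvRuns]
    obtain ⟨hge, hrest⟩ := List.pairwise_cons.mp hs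
    have htail : (rest.dropWhile (fun x => x == c)).Pairwise (· ≤ ·) :=
      hrest.sublist (List.dropWhile_sublist _)
    refine List.pairwise_cons.mpr ⟨?_, ih htail⟩
    intro k hk
    have hkmem : k ∈ rest.dropWhile (fun x => x == c) := (pvRuns_mem _ k).mp hk
    have h1 : c ≤ k := hge k ((List.dropWhile_sublist _).mem hkmem)
    have h2 : k ≠ c := fun h => not_mem_dropWhile_of_sorted c rest hrest hge (h ▸ hkmem)
    exact lt_of_le_of_ne h1 (Ne.symm h2)

theorem pvRuns_lens (s : List Char) (hs : s.Pairwise (· ≤ ·)) :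
    (pvRuns s).2 = (pvRuns s).1.map (fun k => (s.count k : Int)) := by
  induction s using pvRuns.induct with
  | case1 => simp [pvRuns]
  | case2 c rest ih =>
    rw [pvRuns]
    obtain ⟨hge, hrest⟩ := List.pairwise_cons.mp hs
    have htail : (rest.dropWhile (fun x => x == c)).Pairwise (· ≤ ·) :=
      hrest.sublist (List.dropWhile_sublist _)
    have hsplit := List.takeWhile_append_dropWhile (p := fun y => y == c) (l := rest)
    simp only [List.map_cons, List.cons.injEq]
    constructor
    · -- head: count c (c :: rest) = run.length + 1
      have hrun : ∀ x ∈ rest.takeWhile (fun y => y == c), x = c := by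
        intro x hx; simpa using List.mem_takeWhile_imp hx
      have hcnt_run : (rest.takeWhile (fun y => y == c)).count c
          = (rest.takeWhile (fun y => y == c)).length := by
        apply List.count_eq_length.mpr
        intro x hx; exact ((hrun x hx) ▸ rfl : c = x)
      have hcnt_tail : (rest.dropWhile (fun y => y == c)).count c = 0 :=
        List.count_eq_zero.mpr (not_mem_dropWhile_of_sorted c rest hrest hge)
      have hcnt : (c :: rest).count c = (rest.takeWhile (fun y => y == c)).length + 1 := by
        rw [List.count_cons_self]
        congr 1
        conv_lhs => rw [← hsplit]
        rw [List.count_append, hcnt_run, hcnt_tail]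
        omega
      rw [hcnt]
    · -- tail: counts in s restrict to counts in tail for tail keys
      rw [ih htail]
      apply List.map_congr_left
      intro k hk
      have hkmem : k ∈ rest.dropWhile (fun x => x == c) := (pvRuns_mem _ k).mp hk
      have hkc : k ≠ c := fun h => not_mem_dropWhile_of_sorted c rest hrest hge (h ▸ hkmem)
      have hkrun : (rest.takeWhile (fun y => y == c)).count k = 0 := by
        apply List.count_eq_zero.mpr
        intro hx
        exact hkc (by simpa using List.mem_takeWhile_imp hx)
      congr 1
      rw [List.count_cons_of_ne (Ne.symm hkc)]
      conv_rhs => rw [← hsplit]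
      rw [List.count_append, hkrun, Nat.zero_add]

theorem count_go_single (c : Char) : ∀ (s : List Char) (fuel acc : Nat), s.length ≤ fuel →
    PySem.Chars.count.go [c] fuel s acc = acc + s.count c := by
  intro s
  induction s with
  | nil => intro fuel acc _; cases fuel <;> simp [PySem.Chars.count.go]
  | cons h t ih =>
    intro fuel acc hf
    cases fuel with
    | zero => simp at hf
    | succ n =>
      simp only [List.length_cons] at hf
      rw [PySem.Chars.count.go.eq_def]
      by_cases hc : c = h
      · subst hc
        simp [List.isPrefixOf, ih n (acc + 1) (by omega)]
        omega
      · simp [List.isPrefixOf, beq_iff_eq, hc, Ne.symm hc, ih n acc (by omega)]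

theorem str_count_single (w : String) (c : Char) :
    PySem.Str.count w (String.ofList [c]) = w.toList.count c := by
  rw [PySem.Str.count_eq]
  have h1 : (String.ofList [c]).toList = [c] := by simp
  rw [h1]
  simp only [PySem.Chars.count, List.isEmpty_cons, Bool.false_eq_true, if_false]
  rw [count_go_single c w.toList w.toList.length 0 (le_refl _)]
  simp [List.count]

theorem sum_counts (l s : List Char) (hn : s.Nodup) (hm : ∀ c, c ∈ s ↔ c ∈ l) :
    ((s.map (fun c => (l.count c : Int))).sum) = (l.length : Int) := by
  have hperm : s.Perm l.dedup := by
    rw [List.perm_ext_iff_of_nodup hn (List.nodup_dedup l)]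
    intro a; rw [hm a, List.mem_dedup]
  calc (s.map (fun c => (l.count c : Int))).sum
      = (l.dedup.map (fun c => (l.count c : Int))).sum :=
        (hperm.map (fun c => (l.count c : Int))).sum_eq
    _ = ((l.dedup.map (fun c => l.count c)).map (Nat.cast : Nat → Int)).sum := by
        rw [List.map_map]; rfl
    _ = (((l.dedup.map (fun c => l.count c)).sum : Nat) : Int) := (Nat.cast_list_sum _).symm
    _ = (l.length : Int) := by
        have := List.sum_map_count_dedup_eq_length l
        simp only [List.count] at this ⊢
        exact_mod_cast this

theorem closeStrings_spec_aux (word1 word2 : String) :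
    closeStrings word1 word2 = closeStrings_alt word1 word2 := by
  unfold closeStrings closeStrings_alt
  rw [PySem.List.foldl_prod_mk
        (fun a ch => a ++ [((PySem.Str.count word1 (String.ofList [ch]) : Nat) : Int)])
        (fun a ch => a ++ [((PySem.Str.count word2 (String.ofList [ch]) : Nat) : Int)])
        (PySem.Set.ofList word1.toList) [] []]
  simp only [PySem.List.foldl_append_singleton_eq_map, List.nil_append, str_count_single,
    PySem.Str.len_eq]
  generalize word1.toList = l1
  generalize word2.toList = l2
  -- facts about the sorted lists and their runs
  have hp1 : (PySem.List.sorted l1 (fun x => x)).Perm l1 := PySem.List.sorted_perm l1 _ _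
  have hp2 : (PySem.List.sorted l2 (fun x => x)).Perm l2 := PySem.List.sorted_perm l2 _ _
  have hpw1 : (PySem.List.sorted l1 (fun x => x)).Pairwise (· ≤ ·) :=
    PySem.List.sorted_pairwise l1 (fun x => x)
  have hpw2 : (PySem.List.sorted l2 (fun x => x)).Pairwise (· ≤ ·) :=
    PySem.List.sorted_pairwise l2 (fun x => x)
  set K1 := (pvRuns (PySem.List.sorted l1 (fun x => x))).1 with hK1def
  set K2 := (pvRuns (PySem.List.sorted l2 (fun x => x))).1 with hK2def
  have hK1mem : ∀ c, c ∈ K1 ↔ c ∈ l1 := fun c =>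
    (pvRuns_mem _ c).trans hp1.mem_iff
  have hK2mem : ∀ c, c ∈ K2 ↔ c ∈ l2 := fun c =>
    (pvRuns_mem _ c).trans hp2.mem_iff
  have hK1lt : K1.Pairwise (· < ·) := pvRuns_keys_lt _ hpw1
  have hK2lt : K2.Pairwise (· < ·) := pvRuns_keys_lt _ hpw2
  have hL1 : (pvRuns (PySem.List.sorted l1 (fun x => x))).2
      = K1.map (fun k => (l1.count k : Int)) := by
    rw [pvRuns_lens _ hpw1]
    exact List.map_congr_left (fun k _ => by rw [hp1.count_eq])
  have hL2 : (pvRuns (PySem.List.sorted l2 (fun x => x))).2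
      = K2.map (fun k => (l2.count k : Int)) := by
    rw [pvRuns_lens _ hpw2]
    exact List.map_congr_left (fun k _ => by rw [hp2.count_eq])
  rw [hL1, hL2]
  by_cases hset : PySem.Set.equal (PySem.Set.ofList l1) (PySem.Set.ofList l2) = true
  · -- equal character sets
    have hmem : ∀ c : Char, c ∈ PySem.Set.ofList l1 ↔ c ∈ PySem.Set.ofList l2 :=
      (PySem.Set.equal_iff _ _).mp hset
    have hmeml : ∀ c : Char, c ∈ l1 ↔ c ∈ l2 := fun c => by
      rw [← PySem.Set.mem_ofList l1 c, ← PySem.Set.mem_ofList l2 c]; exact hmem c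
    -- the key lists coincide
    have hKperm : K1.Perm K2 := by
      rw [List.perm_ext_iff_of_nodup (hK1lt.imp ne_of_lt) (hK2lt.imp ne_of_lt)]
      intro a; rw [hK1mem a, hK2mem a, hmeml a]
    have hKeq : K1 = K2 := by
      have e1 : PySem.List.sorted K2 (fun x => x) = K1 :=
        PySem.List.sorted_eq_of_perm_of_pairwise_lt K2 K1 (fun x => x) hKperm hK1lt
      have e2 : PySem.List.sorted K2 (fun x => x) = K2 :=
        PySem.List.sorted_eq_of_perm_of_pairwise_lt K2 K2 (fun x => x) (List.Perm.refl K2) hK2lt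
      rw [← e1, e2]
    -- the set sizes coincide
    have hsetperm : (PySem.Set.ofList l1).Perm (PySem.Set.ofList l2) := by
      rw [List.perm_ext_iff_of_nodup (PySem.Set.nodup_ofList _) (PySem.Set.nodup_ofList _)]
      exact hmem
    have hslen : PySem.Set.len (PySem.Set.ofList l1) = PySem.Set.len (PySem.Set.ofList l2) := by
      simp [PySem.Set.len, hsetperm.length_eq]
    -- A's per-set count lists are B's per-key count lists up to permutation
    have hset1K : (PySem.Set.ofList l1).Perm K1 := by
      rw [List.perm_ext_iff_of_nodup (PySem.Set.nodup_ofList _) (hK1lt.imp ne_of_lt)]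
      intro a; rw [PySem.Set.mem_ofList, hK1mem a]
    have hsortA1 : PySem.List.sorted ((PySem.Set.ofList l1).map (fun c => (l1.count c : Int))) (fun x => x)
        = PySem.List.sorted (K1.map (fun c => (l1.count c : Int))) (fun x => x) :=
      PySem.List.sorted_eq_sorted_of_perm _ _ _ (fun a b h => h)
        (hset1K.map (fun c => (l1.count c : Int)))
    have hsortA2 : PySem.List.sorted ((PySem.Set.ofList l1).map (fun c => (l2.count c : Int))) (fun x => x)
        = PySem.List.sorted (K1.map (fun c => (l2.count c : Int))) (fun x => x) :=
      PySem.List.sorted_eq_sorted_of_perm _ _ _ (fun a b h => h)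
        (hset1K.map (fun c => (l2.count c : Int)))
    rw [hset, hslen, hsortA1, hsortA2, ← hKeq]
    by_cases hcmp : PySem.List.sorted (K1.map (fun c => (l1.count c : Int))) (fun x => x)
        = PySem.List.sorted (K1.map (fun c => (l2.count c : Int))) (fun x => x)
    · -- counts agree: lengths agree too, A and B both true
      have hp := (PySem.List.sorted_id_eq_sorted_id_iff_perm _ _).mp hcmp
      have hsumeq := hp.sum_eq
      have h1 := sum_counts l1 K1 (hK1lt.imp ne_of_lt) hK1mem
      have h2 : ((K1.map (fun c => (l2.count c : Int))).sum) = (l2.length : Int) :=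
        sum_counts l2 K1 (hK1lt.imp ne_of_lt) (fun c => (hK1mem c).trans (hmeml c))
      rw [h1, h2] at hsumeq
      have hlen : l1.length = l2.length := by exact_mod_cast hsumeq
      simp [hcmp, hlen]
    · simp [hcmp]
  · -- unequal character sets: both sides return False
    have hset' : PySem.Set.equal (PySem.Set.ofList l1) (PySem.Set.ofList l2) = false :=
      Bool.eq_false_iff.mpr hset
    have hKne : (K1 == K2) = false := by
      apply beq_eq_false_iff_ne.mpr
      intro hKeq
      apply hset
      rw [PySem.Set.equal_iff]
      intro a
      rw [PySem.Set.mem_ofList, PySem.Set.mem_ofList, ← hK1mem a, ← hK2mem a, hKeq]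
    rw [hset', hKne]
    simp

-- ===== VERDICT (by name: the statement is the Claim_ definition above) =====
theorem closeStrings_spec : Claim_equal_closeStrings := by
  intro word1 word2 _
  unfold Spec_closeStrings
  exact closeStrings_spec_aux word1 word2
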